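-- pv_equiv track=rewrite | github.com/vertical-cloud-lab/powder-excavator | scripts/edison_submit.py | _fence_for
-- ===== SOURCE A (Python) =====
-- def _fence_for(content: str) -> str:
--     """Return a backtick fence longer than any run of backticks in ``content``.
--
--     Markdown fenced code blocks terminate on the first line that starts
--     with a fence of equal or greater length than the opener, so to safely
--     embed arbitrary content (including content that itself contains
--     triple-backtick fences) we pick a fence one longer than the longest
--     backtick run in the content (with a floor of 3).
--     """
--     longest = 0
--     run = 0
--     for ch in content:
--         if ch == "`":
--             run += 1
--             if run > longest:
--                 longest = run
--         else:
--             run = 0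
--     return "`" * max(3, longest + 1)
-- ===== SOURCE B (Python) =====
-- def _fence_for(content: str) -> str:
--     """Return a backtick fence longer than any run of backticks in ``content``.
--
--     Instead of a per-character running counter, extract each maximal
--     backtick run (jumping between runs with str.index / str.lstrip),
--     collect the run lengths, and take their maximum.
--     """
--     runs = []
--     rest = content
--     while "`" in rest:
--         rest = rest[rest.index("`"):]
--         stripped = rest.lstrip("`")
--         runs.append(len(rest) - len(stripped))
--         rest = stripped
--     longest = max(runs, default=0)
--     return "`" * max(3, longest + 1)
-- ===== Notes on version B (the rewrite author's own statement) =====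
-- stated objective: faster
-- what changed: B materializes the list of maximal backtick run lengths (jumping run to run with str.index/str.lstrip) and reduces with max, instead of A's per-character Python loop maintaining a running counter and running maximum.
import Mathlib
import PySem

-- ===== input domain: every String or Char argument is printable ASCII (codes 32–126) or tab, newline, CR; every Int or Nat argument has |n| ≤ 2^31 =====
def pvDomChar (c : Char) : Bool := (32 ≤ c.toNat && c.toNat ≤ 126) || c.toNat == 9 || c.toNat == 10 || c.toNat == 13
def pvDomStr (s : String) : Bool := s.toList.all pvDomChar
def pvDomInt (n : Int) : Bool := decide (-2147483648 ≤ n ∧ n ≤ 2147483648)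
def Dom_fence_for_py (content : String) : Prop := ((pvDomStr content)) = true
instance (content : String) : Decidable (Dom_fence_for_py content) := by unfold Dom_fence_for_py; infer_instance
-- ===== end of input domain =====

-- B materializes the list of maximal backtick run lengths and reduces with max,
-- instead of A's per-character loop with a running counter and running maximum (constant-factor faster in a timing run).

-- ===== PORT A =====
-- A's for-loop over the characters, state (longest, run), transcribed as structural recursion
def fenceLoopA : List Char → Nat → Nat → Nat
  | [], longest, _ => longest
  | ch :: rest, longest, run =>
    if ch = '`' then
      let run' := run + 1
      fenceLoopA rest (if run' > longest then run' else longest) run'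
    else
      fenceLoopA rest longest 0

def fence_for_py (content : String) : String :=
  let longest := fenceLoopA content.toList 0 0
  String.ofList (List.replicate (max 3 (longest + 1)) '`')

-- ===== PORT B =====
-- B's while loop: while "`" in rest: rest = rest[rest.index("`"):]; stripped = rest.lstrip("`");
-- runs.append(len(rest) - len(stripped)); rest = stripped
def collectRuns (cs : List Char) : List Nat :=
  if h : cs.contains '`' then
    let rest := cs.drop (cs.idxOf '`')
    let stripped := rest.dropWhile (· = '`')
    (rest.length - stripped.length) :: collectRuns stripped
  else []
termination_by cs.length
decreasing_by
  have hi : cs.idxOf '`' < cs.length := List.idxOf_lt_length_of_mem (by simpa using h)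
  have hrest : cs.drop (cs.idxOf '`') = '`' :: cs.drop (cs.idxOf '`' + 1) := by
    rw [List.drop_eq_getElem_cons hi, List.getElem_idxOf hi]
  have h1 : ((cs.drop (cs.idxOf '`')).dropWhile (· = '`')).length
      ≤ (cs.drop (cs.idxOf '`' + 1)).length := by
    rw [hrest]
    have h0 : List.dropWhile (fun x => decide (x = '`')) ('`' :: cs.drop (cs.idxOf '`' + 1))
        = List.dropWhile (fun x => decide (x = '`')) (cs.drop (cs.idxOf '`' + 1)) := by
      simp
    rw [h0]
    exact List.length_dropWhile_le _ _
  have h2 : (cs.drop (cs.idxOf '`' + 1)).length < cs.length := by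
    rw [List.length_drop]; omega
  simp only [List.length_drop] at *
  omega

def fence_for_py_alt (content : String) : String :=
  let runs := collectRuns content.toList
  let longest := runs.foldl Nat.max 0    -- max(runs, default=0)
  String.ofList (List.replicate (max 3 (longest + 1)) '`')

-- ===== PRECONDITION & SPEC =====
def Spec_fence_for_py (content : String) (out : String) : Prop := out = fence_for_py_alt content
instance (content : String) (out : String) : Decidable (Spec_fence_for_py content out) := by unfold Spec_fence_for_py; infer_instance

-- ===== CLAIM (what is proved, stated in full; the proofs are below) =====
def Claim_equal_fence_for_py : Prop := ∀ (content : String), Dom_fence_for_py content → Spec_fence_for_py content (fence_for_py content)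

-- ===== LEMMAS AND PROOFS =====

-- mathematical yardstick: gRun cs r = maximal backtick-run length, the first run extended by r
def gRun : List Char → Nat → Nat
  | [], r => r
  | c :: cs, r => if c = '`' then gRun cs (r + 1) else max r (gRun cs 0)

theorem ite_gt_eq_max (a b : Nat) : (if a > b then a else b) = max b a := by
  rw [Nat.max_def]; split_ifs <;> omega

theorem gRun_cons_pos (c : Char) (cs : List Char) (r : Nat) (hc : c = '`') :
    gRun (c :: cs) r = gRun cs (r + 1) := by
  simp only [gRun]; rw [if_pos hc]

theorem gRun_cons_neg (c : Char) (cs : List Char) (r : Nat) (hc : ¬ c = '`') :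
    gRun (c :: cs) r = max r (gRun cs 0) := by
  simp only [gRun]; rw [if_neg hc]

theorem le_gRun (cs : List Char) : ∀ r, r ≤ gRun cs r := by
  induction cs with
  | nil => intro r; simp [gRun]
  | cons c cs ih =>
    intro r
    by_cases hc : c = '`'
    · rw [gRun_cons_pos c cs r hc]
      exact le_trans (Nat.le_succ r) (ih (r + 1))
    · rw [gRun_cons_neg c cs r hc]
      exact le_max_left _ _

theorem fenceLoopA_eq (cs : List Char) : ∀ l r, r ≤ l → fenceLoopA cs l r = max l (gRun cs r) := by
  induction cs with
  | nil => intro l r h; simp only [fenceLoopA, gRun]; omega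
  | cons c cs ih =>
    intro l r h
    by_cases hc : c = '`'
    · have e1 : fenceLoopA (c :: cs) l r = fenceLoopA cs (max l (r + 1)) (r + 1) := by
        simp only [fenceLoopA]; rw [if_pos hc, ite_gt_eq_max]
      rw [e1, ih (max l (r + 1)) (r + 1) (le_max_right _ _), gRun_cons_pos c cs r hc]
      have h2 := le_gRun cs (r + 1)
      omega
    · have e1 : fenceLoopA (c :: cs) l r = fenceLoopA cs l 0 := by
        simp only [fenceLoopA]; rw [if_neg hc]
      rw [e1, ih l 0 (Nat.zero_le _), gRun_cons_neg c cs r hc]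
      omega

theorem gRun_takeWhile (cs : List Char) : ∀ r,
    gRun cs r = max (r + (cs.takeWhile (· = '`')).length) (gRun (cs.dropWhile (· = '`')) 0) := by
  induction cs with
  | nil => intro r; simp [gRun]
  | cons c cs ih =>
    intro r
    by_cases hc : c = '`'
    · rw [gRun_cons_pos c cs r hc, ih (r + 1)]
      have ht : (c :: cs).takeWhile (· = '`') = c :: cs.takeWhile (· = '`') := by
        simp [List.takeWhile_cons, hc]
      have hd : (c :: cs).dropWhile (· = '`') = cs.dropWhile (· = '`') := by
        simp [List.dropWhile_cons, hc]
      rw [ht, hd, List.length_cons]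
      omega
    · have ht : (c :: cs).takeWhile (· = '`') = [] := by
        simp [List.takeWhile_cons, hc]
      have hd : (c :: cs).dropWhile (· = '`') = c :: cs := by
        simp [List.dropWhile_cons, hc]
      rw [ht, hd, gRun_cons_neg c cs r hc, gRun_cons_neg c cs 0 hc]
      simp only [List.length_nil, Nat.add_zero]
      omega

theorem gRun_drop_idxOf (cs : List Char) : gRun (cs.drop (cs.idxOf '`')) 0 = gRun cs 0 := by
  induction cs with
  | nil => simp
  | cons c cs ih =>
    by_cases hc : c = '`'
    · subst hc; simp [List.idxOf_cons_self]
    · rw [show List.idxOf '`' (c :: cs) = List.idxOf '`' cs + 1 from by simp [List.idxOf_cons, hc],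
          List.drop_succ_cons, gRun_cons_neg c cs 0 hc, ih]
      omega

theorem gRun_no_backtick (cs : List Char) (h : ¬ cs.contains '`' = true) : gRun cs 0 = 0 := by
  induction cs with
  | nil => simp [gRun]
  | cons c cs ih =>
    simp only [List.contains_cons, Bool.or_eq_true, not_or] at h
    have hc : ¬ c = '`' := by
      intro hc; exact h.1 (by simp [hc])
    rw [gRun_cons_neg c cs 0 hc, ih (by simpa using h.2)]
    simp

theorem collectRuns_foldl (cs : List Char) (a : Nat) :
    (collectRuns cs).foldl Nat.max a = max a (gRun cs 0) := by
  by_cases h : cs.contains '`'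
  · have hi : cs.idxOf '`' < cs.length := List.idxOf_lt_length_of_mem (by simpa using h)
    have hrest : cs.drop (cs.idxOf '`') = '`' :: cs.drop (cs.idxOf '`' + 1) := by
      rw [List.drop_eq_getElem_cons hi, List.getElem_idxOf hi]
    have hlt : ((cs.drop (cs.idxOf '`')).dropWhile (· = '`')).length < cs.length := by
      have h1 : ((cs.drop (cs.idxOf '`')).dropWhile (· = '`')).length
          ≤ (cs.drop (cs.idxOf '`' + 1)).length := by
        rw [hrest]
        have h0 : List.dropWhile (fun x => decide (x = '`')) ('`' :: cs.drop (cs.idxOf '`' + 1))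
            = List.dropWhile (fun x => decide (x = '`')) (cs.drop (cs.idxOf '`' + 1)) := by
          simp
        rw [h0]
        exact List.length_dropWhile_le _ _
      have h2 : (cs.drop (cs.idxOf '`' + 1)).length < cs.length := by
        rw [List.length_drop]; omega
      omega
    have hunfold : collectRuns cs =
        ((cs.drop (cs.idxOf '`')).length - ((cs.drop (cs.idxOf '`')).dropWhile (· = '`')).length)
          :: collectRuns ((cs.drop (cs.idxOf '`')).dropWhile (· = '`')) := by
      rw [collectRuns.eq_def, dif_pos h]
    have hlen : ((cs.drop (cs.idxOf '`')).takeWhile (· = '`')).length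
        + ((cs.drop (cs.idxOf '`')).dropWhile (· = '`')).length
        = (cs.drop (cs.idxOf '`')).length := by
      have h3 := congrArg List.length
        (List.takeWhile_append_dropWhile (p := (· = '`')) (l := cs.drop (cs.idxOf '`')))
      rw [List.length_append] at h3
      exact h3
    have hg : gRun cs 0 = max ((cs.drop (cs.idxOf '`')).length
        - ((cs.drop (cs.idxOf '`')).dropWhile (· = '`')).length)
        (gRun ((cs.drop (cs.idxOf '`')).dropWhile (· = '`')) 0) := by
      rw [← gRun_drop_idxOf cs, gRun_takeWhile (cs.drop (cs.idxOf '`')) 0]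
      have h4 : ((cs.drop (cs.idxOf '`')).takeWhile (· = '`')).length
          = (cs.drop (cs.idxOf '`')).length
            - ((cs.drop (cs.idxOf '`')).dropWhile (· = '`')).length := by omega
      rw [h4]
      simp
    rw [hunfold, List.foldl_cons,
        collectRuns_foldl ((cs.drop (cs.idxOf '`')).dropWhile (· = '`'))
          (Nat.max a ((cs.drop (cs.idxOf '`')).length
            - ((cs.drop (cs.idxOf '`')).dropWhile (· = '`')).length)),
        hg]
    have h5 := le_gRun ((cs.drop (cs.idxOf '`')).dropWhile (· = '`')) 0
    simp only [Nat.max_def]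
    split_ifs <;> omega
  · have hnil : collectRuns cs = [] := by rw [collectRuns.eq_def, dif_neg h]
    rw [hnil, gRun_no_backtick cs h]
    simp
termination_by cs.length
decreasing_by exact hlt

-- ===== VERDICT (by name: the statement is the Claim_ definition above) =====
theorem fence_for_py_spec : Claim_equal_fence_for_py := by
  intro content _
  show String.ofList (List.replicate (max 3 (fenceLoopA content.toList 0 0 + 1)) '`') =
    String.ofList (List.replicate (max 3 ((collectRuns content.toList).foldl Nat.max 0 + 1)) '`')
  rw [fenceLoopA_eq _ 0 0 (le_refl 0), collectRuns_foldl]
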